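-- pv_equiv track=rewrite | github.com/eugene-doobu/eugene-baekjoon | _nonmainstreamLang/python3/_programmers/implementation/68645.py | solution
-- ===== SOURCE A (Python) =====
-- def solution(n):
--     array = [[0] * n for _ in range(n)]
--
--     row = -1
--     col = 0
--     power = n
--     qwe = 1
--     while power >= 1:
--       x = 0
--       y = 0
--       if (n-power) % 3 == 0:
--         x = 0
--         y = 1
--       elif (n-power) % 3 == 1:
--         x = 1
--         y = 0
--       elif (n-power) % 3 == 2:
--         x = -1
--         y = -1
--
--       col += x
--       row += y
--       for k in range(power):
--         array[row][col] = qwe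
--         qwe += 1
--         col += x
--         row += y
--       col -= x
--       row -= y
--       power -=1
--
--     rst = []
--     for k in array:
--       for l in k:
--         if l != 0:
--           rst.append(l)
--     return rst
-- ===== SOURCE B (Python) =====
-- def solution(n):
--     # Closed form: no grid, no simulation. Each triangle cell (r, c), c <= r < n,
--     # lies on ring k = min(c, n-1-r, r-c); its segment index j and offset within
--     # the segment give its snail value directly: value = 1 + j*n - j*(j-1)//2 + off.
--     out = []
--     for r in range(n):
--         for c in range(r + 1):
--             k = min(c, n - 1 - r, r - c)
--             if c == k:                 # vertical segment (going down)
--                 j = 3 * k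
--                 off = r - 2 * k
--             elif n - 1 - r == k:       # horizontal segment (going right)
--                 j = 3 * k + 1
--                 off = c - k - 1
--             else:                      # diagonal segment (going up-left)
--                 j = 3 * k + 2
--                 off = n - k - 2 - r
--             out.append(1 + j * n - j * (j - 1) // 2 + off)
--     return out
-- ===== Notes on version B (the rewrite author's own statement) =====
-- stated objective: alternative
-- what changed: B replaces the stateful snail simulation (n-by-n grid filled segment by segment, then flattened and filtered) by a direct closed form: for each triangle cell in row-major order it computes its ring k = min(c, n-1-r, r-c), segment index and offset, and emits the value 1 + j*n - j*(j-1)//2 + off, so no grid and no second pass exist.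
import Mathlib
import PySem

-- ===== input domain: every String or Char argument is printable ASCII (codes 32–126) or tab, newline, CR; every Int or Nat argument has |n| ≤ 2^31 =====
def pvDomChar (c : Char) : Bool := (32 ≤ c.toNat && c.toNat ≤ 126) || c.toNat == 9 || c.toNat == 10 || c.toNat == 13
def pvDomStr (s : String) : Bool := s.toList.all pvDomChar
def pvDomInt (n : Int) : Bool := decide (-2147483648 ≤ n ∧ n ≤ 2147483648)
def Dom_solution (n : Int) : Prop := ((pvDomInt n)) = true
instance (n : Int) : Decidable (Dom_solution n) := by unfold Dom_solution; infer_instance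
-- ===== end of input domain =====

-- B replaces A's stateful snail simulation by a per-cell closed form; same values, proved equal below (objective: alternative).

-- ===== PORT A =====
-- array[r][c] = v with Python semantics (negative indices wrap); out-of-range is a
-- no-op here where Python would raise IndexError, which A's indices never do.
def pvSetCell (g : List (List Int)) (r c v : Int) : List (List Int) :=
  PySem.List.pySetD g r (PySem.List.pySetD (PySem.List.pyGetD g r []) c v)

def solution (n : Int) : List Int :=
  let array : List (List Int) := (PySem.List.pyRange 0 n 1).map (fun _ => PySem.List.pyRepeat [(0:Int)] n)
  -- while power >= 1: power takes the values n, n-1, …, 1; state (array, row, col, qwe)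
  let s := (PySem.List.pyRange n 0 (-1)).foldl
    (fun (s : List (List Int) × Int × Int × Int) power =>
      let d := PySem.Int.mod (n - power) 3
      let x : Int := if d = 0 then 0 else if d = 1 then 1 else if d = 2 then -1 else 0
      let y : Int := if d = 0 then 1 else if d = 1 then 0 else if d = 2 then -1 else 0
      let col := s.2.2.1 + x
      let row := s.2.1 + y
      let t := (PySem.List.pyRange 0 power 1).foldl
        (fun (t : List (List Int) × Int × Int × Int) _ =>
          (pvSetCell t.1 t.2.1 t.2.2.1 t.2.2.2, t.2.1 + y, t.2.2.1 + x, t.2.2.2 + 1))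
        (s.1, row, col, s.2.2.2)
      (t.1, t.2.1 - y, t.2.2.1 - x, t.2.2.2))
    (array, -1, 0, 1)
  s.1.foldl (fun rst k => k.foldl (fun rst l => if l ≠ 0 then rst ++ [l] else rst) rst) []

-- ===== PORT B =====
def solution_alt (n : Int) : List Int :=
  (PySem.List.pyRange 0 n 1).foldl (fun out r =>
    (PySem.List.pyRange 0 (r + 1) 1).foldl (fun out c =>
      let k := min c (min (n - 1 - r) (r - c))
      let joff : Int × Int :=
        if c = k then (3 * k, r - 2 * k)
        else if n - 1 - r = k then (3 * k + 1, c - k - 1)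
        else (3 * k + 2, n - k - 2 - r)
      out ++ [1 + joff.1 * n - PySem.Int.floordiv (joff.1 * (joff.1 - 1)) 2 + joff.2]) out) []

-- ===== PRECONDITION & SPEC =====
def Spec_solution (n : Int) (out : List Int) : Prop := out = solution_alt n
instance (n : Int) (out : List Int) : Decidable (Spec_solution n out) := by unfold Spec_solution; infer_instance

-- ===== CLAIM (what is proved, stated in full; the proofs are below) =====
def Claim_equal_solution : Prop := ∀ (n : Int), Dom_solution n → Spec_solution n (solution n)

-- ===== LEMMAS AND PROOFS =====

-- grid cell read: array[r][c] with default 0 (out-of-range rows behave like an all-zero row)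
def pvGget (g : List (List Int)) (r c : Int) : Int :=
  PySem.List.pyGetD (PySem.List.pyGetD g r []) c 0

def pvShape (n : Int) (g : List (List Int)) : Prop :=
  g.length = n.toNat ∧ ∀ row ∈ g, row.length = n.toNat

-- ring, segment index, offset and value of a triangle cell (the closed form B uses)
def pvRing (n r c : Int) : Int := min c (min (n - 1 - r) (r - c))
def pvSeg (n r c : Int) : Int :=
  if c = pvRing n r c then 3 * pvRing n r c
  else if n - 1 - r = pvRing n r c then 3 * pvRing n r c + 1
  else 3 * pvRing n r c + 2
def pvOff (n r c : Int) : Int :=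
  if c = pvRing n r c then r - 2 * pvRing n r c
  else if n - 1 - r = pvRing n r c then c - pvRing n r c - 1
  else n - pvRing n r c - 2 - r
def pvQ (n j : Int) : Int := 1 + j * n - PySem.Int.floordiv (j * (j - 1)) 2
def pvF (n r c : Int) : Int := pvQ n (pvSeg n r c) + pvOff n r c
def pvG (n r c : Int) : Int := if 0 ≤ c ∧ c ≤ r ∧ r < n then pvF n r c else 0

-- start cell (row, col) of segment j = 3*k + d, and its direction (drow, dcol)
def pvSPos (n k d : Int) : Int × Int :=
  if d = 0 then (2 * k, k) else if d = 1 then (n - k - 1, k + 1) else (n - k - 2, n - 2 * k - 2)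
def pvDir (d : Int) : Int × Int :=
  if d = 0 then (1, 0) else if d = 1 then (0, 1) else (-1, -1)

-- loop bodies of A's port, named for the proofs (definitionally equal to the inline lambdas)
def pvIStep (x y : Int) (t : List (List Int) × Int × Int × Int) :
    List (List Int) × Int × Int × Int :=
  (pvSetCell t.1 t.2.1 t.2.2.1 t.2.2.2, t.2.1 + y, t.2.2.1 + x, t.2.2.2 + 1)

def pvOStep (n : Int) (s : List (List Int) × Int × Int × Int) (power : Int) :
    List (List Int) × Int × Int × Int :=
  let d := PySem.Int.mod (n - power) 3
  let x : Int := if d = 0 then 0 else if d = 1 then 1 else if d = 2 then -1 else 0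
  let y : Int := if d = 0 then 1 else if d = 1 then 0 else if d = 2 then -1 else 0
  let col := s.2.2.1 + x
  let row := s.2.1 + y
  let t := (PySem.List.pyRange 0 power 1).foldl
    (fun (t : List (List Int) × Int × Int × Int) _ =>
      (pvSetCell t.1 t.2.1 t.2.2.1 t.2.2.2, t.2.1 + y, t.2.2.1 + x, t.2.2.2 + 1))
    (s.1, row, col, s.2.2.2)
  (t.1, t.2.1 - y, t.2.2.1 - x, t.2.2.2)

-- grid after segments < j are fully written and the first w cells of segment j are written
def pvFilled (n j w : Int) (g : List (List Int)) : Prop :=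
  ∀ r c : Int, 0 ≤ r → 0 ≤ c →
    pvGget g r c =
      if c ≤ r ∧ r < n ∧ (pvSeg n r c < j ∨ (pvSeg n r c = j ∧ pvOff n r c < w))
      then pvF n r c else 0

lemma pvFoldlConst {α σ : Type} (F : σ → σ) (l : List α) (init : σ) :
    l.foldl (fun s _ => F s) init = F^[l.length] init := by
  induction l generalizing init with
  | nil => rfl
  | cons a l ih => simp [List.foldl_cons, ih, Function.iterate_succ_apply]

-- cells of segment (k, d): in range, on the triangle, with the stated seg index and offset
lemma pvLemA (n k d t : Int) (hk : 0 ≤ k) (hd : d = 0 ∨ d = 1 ∨ d = 2)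
    (ht : 0 ≤ t) (htl : t < n - (3 * k + d)) :
    0 ≤ (pvSPos n k d).1 + t * (pvDir d).1 ∧ (pvSPos n k d).1 + t * (pvDir d).1 < n ∧
    0 ≤ (pvSPos n k d).2 + t * (pvDir d).2 ∧ (pvSPos n k d).2 + t * (pvDir d).2 < n ∧
    (pvSPos n k d).2 + t * (pvDir d).2 ≤ (pvSPos n k d).1 + t * (pvDir d).1 ∧
    pvSeg n ((pvSPos n k d).1 + t * (pvDir d).1) ((pvSPos n k d).2 + t * (pvDir d).2) = 3 * k + d ∧
    pvOff n ((pvSPos n k d).1 + t * (pvDir d).1) ((pvSPos n k d).2 + t * (pvDir d).2) = t := by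
  rcases hd with rfl | rfl | rfl <;>
    simp only [pvSPos, pvDir, pvSeg, pvOff, pvRing] <;> norm_num <;> split_ifs <;> omega

-- every triangle cell lies on exactly one segment, at its stated offset
lemma pvLemB (n r c : Int) (h0 : 0 ≤ c) (h1 : c ≤ r) (h2 : r < n) :
    ∃ k d, 0 ≤ k ∧ (d = 0 ∨ d = 1 ∨ d = 2) ∧ pvSeg n r c = 3 * k + d ∧
      0 ≤ pvOff n r c ∧ pvOff n r c < n - (3 * k + d) ∧
      r = (pvSPos n k d).1 + pvOff n r c * (pvDir d).1 ∧
      c = (pvSPos n k d).2 + pvOff n r c * (pvDir d).2 := by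
  by_cases hc : c = pvRing n r c
  · refine ⟨pvRing n r c, 0, ?_, Or.inl rfl, ?_⟩ <;>
      simp only [pvSPos, pvDir, pvSeg, pvOff, pvRing] at * <;> norm_num <;> (try split_ifs) <;> omega
  · by_cases hb : n - 1 - r = pvRing n r c
    · refine ⟨pvRing n r c, 1, ?_, Or.inr (Or.inl rfl), ?_⟩ <;>
        simp only [pvSPos, pvDir, pvSeg, pvOff, pvRing] at * <;> norm_num <;> (try split_ifs) <;> omega
    · refine ⟨pvRing n r c, 2, ?_, Or.inr (Or.inr rfl), ?_⟩ <;>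
        simp only [pvSPos, pvDir, pvSeg, pvOff, pvRing] at * <;> norm_num <;> (try split_ifs) <;> omega

lemma pvHalfEven (x m : Int) (h : x = 2 * m) : PySem.Int.floordiv x 2 = m := by
  subst h
  rw [PySem.Int.floordiv_eq_ediv_of_pos (by norm_num : (0:Int) < 2)]
  omega

lemma pvQSucc (n j : Int) : pvQ n j + (n - j) = pvQ n (j + 1) := by
  obtain ⟨t, ht⟩ := Int.even_mul_succ_self (j - 1)
  obtain ⟨m, hm⟩ : ∃ m, j * (j - 1) = 2 * m := ⟨t, by linear_combination ht⟩
  obtain ⟨t2, ht2⟩ := Int.even_mul_succ_self j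
  obtain ⟨m2, hm2⟩ : ∃ m2, (j + 1) * (j + 1 - 1) = 2 * m2 := ⟨t2, by linear_combination ht2⟩
  simp only [pvQ, pvHalfEven _ _ hm, pvHalfEven _ _ hm2]
  have h3 : m2 = m + j := by
    have := hm; have := hm2; nlinarith [hm, hm2]
  rw [h3]; ring

lemma pvFPos (n r c : Int) (h0 : 0 ≤ c) (h1 : c ≤ r) (h2 : r < n) : 1 ≤ pvF n r c := by
  obtain ⟨k, d, hk, hd, hseg, ho1, ho2, _, _⟩ := pvLemB n r c h0 h1 h2
  have hj : 0 ≤ pvSeg n r c := by omega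
  have hjn : pvSeg n r c < n := by omega
  obtain ⟨t, ht⟩ := Int.even_mul_succ_self (pvSeg n r c - 1)
  obtain ⟨m, hm⟩ : ∃ m, pvSeg n r c * (pvSeg n r c - 1) = 2 * m := ⟨t, by linear_combination ht⟩
  have hmul : 0 ≤ pvSeg n r c * (2 * n - (pvSeg n r c - 1)) :=
    mul_nonneg hj (by omega)
  simp only [pvF, pvQ, pvHalfEven _ _ hm]
  nlinarith [hmul, hm]

lemma pvGgetEq (g : List (List Int)) (r c : Int) (h0 : 0 ≤ r) (h1 : 0 ≤ c) :
    pvGget g r c = ((g[r.toNat]?.getD [])[c.toNat]?).getD 0 := by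
  rw [pvGget, PySem.List.pyGetD_of_nonneg _ _ h0, PySem.List.pyGetD_of_nonneg _ _ h1,
    List.getD_eq_getElem?_getD, List.getD_eq_getElem?_getD]

-- advancing one cell: A's write at an in-range cell, read back pointwise
lemma pvSetCellSpec (n : Int) (g : List (List Int)) (hs : pvShape n g) (r c v : Int)
    (hr0 : 0 ≤ r) (hr1 : r < n) (hc0 : 0 ≤ c) (hc1 : c < n) :
    pvShape n (pvSetCell g r c v) ∧ ∀ r' c' : Int, 0 ≤ r' → 0 ≤ c' →
      pvGget (pvSetCell g r c v) r' c' = if r' = r ∧ c' = c then v else pvGget g r' c' := by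
  obtain ⟨hlen, hrows⟩ := hs
  have hi : r.toNat < g.length := by omega
  have hrowlen : g[r.toNat].length = n.toNat := hrows _ (List.getElem_mem hi)
  have hci : c.toNat < g[r.toNat].length := by omega
  have hget : PySem.List.pyGetD g r [] = g[r.toNat] := by
    rw [PySem.List.pyGetD_of_nonneg _ _ hr0, List.getD_eq_getElem?_getD,
      List.getElem?_eq_getElem hi, Option.getD_some]
  have hsc : pvSetCell g r c v = g.set r.toNat (g[r.toNat].set c.toNat v) := by
    rw [pvSetCell, hget, PySem.List.pySetD_of_nonneg _ _ hc0,
      PySem.List.pySetD_of_nonneg _ _ hr0]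
  constructor
  · refine ⟨by rw [hsc]; simpa using hlen, ?_⟩
    intro row hrow
    rw [hsc] at hrow
    rcases List.mem_or_eq_of_mem_set hrow with h | h
    · exact hrows _ h
    · rw [h]; simpa using hrowlen
  · intro r' c' h0 h1
    rw [hsc, pvGgetEq _ _ _ h0 h1, pvGgetEq _ _ _ h0 h1, List.getElem?_set]
    by_cases hre : r' = r
    · have hnn : r.toNat = r'.toNat := by omega
      rw [if_pos hnn, if_pos hi, Option.getD_some, List.getElem?_set, ← hnn,
        List.getElem?_eq_getElem hi, Option.getD_some]
      by_cases hce : c' = c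
      · have hcc : c.toNat = c'.toNat := by omega
        rw [if_pos hcc, if_pos hci, if_pos ⟨hre, hce⟩, Option.getD_some]
      · rw [if_neg (by omega), if_neg (fun hh => hce hh.2)]
    · rw [if_neg (by omega), if_neg (fun hh => hre hh.1)]

-- the zero grid
lemma pvZeroShape (n : Int) :
    pvShape n ((PySem.List.pyRange 0 n 1).map (fun _ => PySem.List.pyRepeat [(0:Int)] n)) := by
  constructor
  · simp [PySem.List.length_pyRange_one]
  · intro row hrow
    obtain ⟨a, _, ha⟩ := List.mem_map.mp hrow
    rw [← ha, PySem.List.pyRepeat_singleton, List.length_replicate]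

lemma pvZeroFilled (n : Int) :
    pvFilled n 0 0 ((PySem.List.pyRange 0 n 1).map (fun _ => PySem.List.pyRepeat [(0:Int)] n)) := by
  intro r c hr hc
  rw [pvGgetEq _ _ _ hr hc]
  have hz : ∀ row ∈ (PySem.List.pyRange 0 n 1).map (fun _ => PySem.List.pyRepeat [(0:Int)] n),
      row = List.replicate n.toNat (0:Int) := by
    intro row hrow
    obtain ⟨a, _, ha⟩ := List.mem_map.mp hrow
    rw [← ha, PySem.List.pyRepeat_singleton]
  rw [if_neg]
  · rcases hro : ((PySem.List.pyRange 0 n 1).map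
        (fun _ => PySem.List.pyRepeat [(0:Int)] n))[r.toNat]? with _ | row
    · simp
    · have hrow := hz _ (List.mem_of_getElem? hro)
      rcases hce : row[c.toNat]? with _ | x
      · simp [hce]
      · have : x = 0 := by
          have := List.mem_of_getElem? hce
          rw [hrow] at this
          exact List.eq_of_mem_replicate this
        simp [hce, this]
  · rintro ⟨h1, h2, h3⟩
    obtain ⟨k, d, hk, hd, hseg, ho1, ho2, _, _⟩ := pvLemB n r c hc h1 h2
    omega

lemma pvFilledSucc (n j : Int) (g : List (List Int)) (h : pvFilled n j (n - j) g) :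
    pvFilled n (j + 1) 0 g := by
  intro r c hr hc
  rw [h r c hr hc]
  by_cases htri : c ≤ r ∧ r < n
  · obtain ⟨k, d, hk, hd, hseg, ho1, ho2, _, _⟩ := pvLemB n r c hc htri.1 htri.2
    exact if_congr (by omega) rfl rfl
  · rw [if_neg (fun hh => htri ⟨hh.1, hh.2.1⟩), if_neg (fun hh => htri ⟨hh.1, hh.2.1⟩)]

-- filling one whole segment, one cell per iteration
lemma pvFill (n k d : Int) (hk : 0 ≤ k) (hd : d = 0 ∨ d = 1 ∨ d = 2) :
    ∀ (t : Nat) (w : Int) (g : List (List Int)) (row col qwe : Int), 0 ≤ w →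
      w + (t : Int) = n - (3 * k + d) →
      pvShape n g → pvFilled n (3 * k + d) w g →
      row = (pvSPos n k d).1 + w * (pvDir d).1 →
      col = (pvSPos n k d).2 + w * (pvDir d).2 →
      qwe = pvQ n (3 * k + d) + w →
      pvShape n ((pvIStep (pvDir d).2 (pvDir d).1)^[t] (g, row, col, qwe)).1 ∧
      pvFilled n (3 * k + d) (n - (3 * k + d)) ((pvIStep (pvDir d).2 (pvDir d).1)^[t] (g, row, col, qwe)).1 ∧
      ((pvIStep (pvDir d).2 (pvDir d).1)^[t] (g, row, col, qwe)).2.1 =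
        (pvSPos n k d).1 + (n - (3 * k + d)) * (pvDir d).1 ∧
      ((pvIStep (pvDir d).2 (pvDir d).1)^[t] (g, row, col, qwe)).2.2.1 =
        (pvSPos n k d).2 + (n - (3 * k + d)) * (pvDir d).2 ∧
      ((pvIStep (pvDir d).2 (pvDir d).1)^[t] (g, row, col, qwe)).2.2.2 =
        pvQ n (3 * k + d) + (n - (3 * k + d)) := by
  intro t
  induction t with
  | zero =>
    intro w g row col qwe hw0 hwt hsh hfl hrow hcol hqwe
    have hw : w = n - (3 * k + d) := by push_cast at hwt; omega
    subst hw
    simp only [Function.iterate_zero, id_eq]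
    exact ⟨hsh, hfl, by rw [hrow], by rw [hcol], by rw [hqwe]⟩
  | succ t ih =>
    intro w g row col qwe hw0 hwt hsh hfl hrow hcol hqwe
    have hwlt : w < n - (3 * k + d) := by push_cast at hwt; omega
    obtain ⟨ha0, ha1, ha2, ha3, ha4, hseg, hoff⟩ := pvLemA n k d w hk hd hw0 hwlt
    rw [← hrow] at ha0 ha1 hseg hoff ha4
    rw [← hcol] at ha2 ha3 hseg hoff ha4
    obtain ⟨hsh2, hpt⟩ := pvSetCellSpec n g hsh row col qwe ha0 ha1 ha2 ha3
    have hfl2 : pvFilled n (3 * k + d) (w + 1) (pvSetCell g row col qwe) := by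
      intro r' c' h0 h1
      rw [hpt r' c' h0 h1]
      by_cases heq : r' = row ∧ c' = col
      · rw [if_pos heq, heq.1, heq.2, if_pos ⟨ha4, ha1, Or.inr ⟨hseg, by omega⟩⟩,
          pvF, hseg, hoff, hqwe]
      · rw [if_neg heq, hfl r' c' h0 h1]
        by_cases htri : c' ≤ r' ∧ r' < n
        · obtain ⟨k', d', hk', hd', hseg', ho1', ho2', hr', hc'⟩ :=
            pvLemB n r' c' h1 htri.1 htri.2
          apply if_congr _ rfl rfl
          constructor
          · rintro ⟨x1, x2, x3⟩
            exact ⟨x1, x2, by omega⟩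
          · rintro ⟨x1, x2, x3⟩
            refine ⟨x1, x2, ?_⟩
            rcases x3 with hlt | ⟨hseq, hofflt⟩
            · exact Or.inl hlt
            · by_cases hoffw : pvOff n r' c' = w
              · exfalso
                have hkd : k' = k ∧ d' = d := by omega
                apply heq
                have h5 : r' = row := by rw [hr', hoffw, hkd.1, hkd.2, hrow]
                have h6 : c' = col := by rw [hc', hoffw, hkd.1, hkd.2, hcol]
                exact ⟨h5, h6⟩
              · exact Or.inr ⟨hseq, by omega⟩
        · rw [if_neg (fun hh => htri ⟨hh.1, hh.2.1⟩), if_neg (fun hh => htri ⟨hh.1, hh.2.1⟩)]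
    have hstep : pvIStep (pvDir d).2 (pvDir d).1 (g, row, col, qwe) =
        (pvSetCell g row col qwe, row + (pvDir d).1, col + (pvDir d).2, qwe + 1) := rfl
    rw [Function.iterate_succ_apply, hstep]
    exact ih (w + 1) _ _ _ _ (by omega) (by push_cast at hwt ⊢; omega) hsh2 hfl2
      (by rw [hrow]; ring) (by rw [hcol]; ring) (by rw [hqwe]; ring)

-- end position of a segment, re-expressed as the pre-start position of the next segment
lemma pvChain (n k d : Int) (hk : 0 ≤ k) (hd : d = 0 ∨ d = 1 ∨ d = 2) :
    ∃ k' d', 0 ≤ k' ∧ (d' = 0 ∨ d' = 1 ∨ d' = 2) ∧ 3 * k' + d' = 3 * k + d + 1 ∧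
      (pvSPos n k d).1 + (n - (3 * k + d)) * (pvDir d).1 - (pvDir d).1 =
        (pvSPos n k' d').1 - (pvDir d').1 ∧
      (pvSPos n k d).2 + (n - (3 * k + d)) * (pvDir d).2 - (pvDir d).2 =
        (pvSPos n k' d').2 - (pvDir d').2 := by
  rcases hd with rfl | rfl | rfl
  · exact ⟨k, 1, hk, by norm_num, by ring, by simp [pvSPos, pvDir]; ring,
      by simp [pvSPos, pvDir]⟩
  · exact ⟨k, 2, hk, by norm_num, by ring, by simp [pvSPos, pvDir]; ring,
      by simp [pvSPos, pvDir]; ring⟩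
  · exact ⟨k + 1, 0, by omega, by norm_num, by ring, by simp [pvSPos, pvDir]; ring,
      by simp [pvSPos, pvDir]; ring⟩

-- the outer while loop, by downward induction on power
lemma pvOuter (n : Int) : ∀ (m : Nat) (g : List (List Int)) (row col qwe : Int),
    (m : Int) ≤ n → pvShape n g → pvFilled n (n - m) 0 g →
    (∃ k d, 0 ≤ k ∧ (d = 0 ∨ d = 1 ∨ d = 2) ∧ n - (m : Int) = 3 * k + d ∧
      row = (pvSPos n k d).1 - (pvDir d).1 ∧ col = (pvSPos n k d).2 - (pvDir d).2) →
    qwe = pvQ n (n - m) →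
    pvShape n (((PySem.List.pyRange (m : Int) 0 (-1)).foldl (pvOStep n) (g, row, col, qwe)).1) ∧
    ∀ r c : Int, 0 ≤ r → 0 ≤ c →
      pvGget (((PySem.List.pyRange (m : Int) 0 (-1)).foldl (pvOStep n) (g, row, col, qwe)).1) r c =
        pvG n r c := by
  intro m
  induction m with
  | zero =>
    intro g row col qwe hm hsh hfl _ _
    rw [show ((0:Nat):Int) = 0 from rfl, PySem.List.pyRange_neg_one_eq_nil (le_refl 0),
      List.foldl_nil]
    refine ⟨hsh, ?_⟩
    intro r c hr hc
    have hfl' : pvFilled n n 0 g := by simpa using hfl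
    rw [hfl' r c hr hc, pvG]
    by_cases htri : c ≤ r ∧ r < n
    · obtain ⟨k, d, hk, hd, hseg, ho1, ho2, _, _⟩ := pvLemB n r c hc htri.1 htri.2
      apply if_congr _ rfl rfl
      constructor
      · rintro ⟨a, b, _⟩; exact ⟨hc, a, b⟩
      · rintro ⟨_, a, b⟩; exact ⟨a, b, Or.inl (by omega)⟩
    · rw [if_neg (fun hh => htri ⟨hh.1, hh.2.1⟩), if_neg (fun hh => htri ⟨hh.2.1, hh.2.2⟩)]
  | succ m ih =>
    intro g row col qwe hm hsh hfl hpos hqwe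
    obtain ⟨k, d, hk, hd, hjd, hrow, hcol⟩ := hpos
    have hd' : 0 ≤ d ∧ d ≤ 2 := by rcases hd with rfl | rfl | rfl <;> norm_num
    have hjlt : 3 * k + d < n := by
      have : ((m+1:Nat):Int) = (m:Int) + 1 := by push_cast; ring
      omega
    have hmod : PySem.Int.mod (n - ((m+1:Nat):Int)) 3 = d := by
      rw [PySem.Int.mod_eq_emod_of_pos (by norm_num), hjd]; omega
    have hlen : (PySem.List.pyRange 0 ((m+1:Nat):Int) 1).length = m + 1 := by
      rw [PySem.List.length_pyRange_one]; omega
    obtain ⟨hsh2, hfl2, hp1, hp2, hp3⟩ :=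
      pvFill n k d hk hd (m+1) 0 g (row + (pvDir d).1) (col + (pvDir d).2) qwe (le_refl 0)
        (by push_cast at hjd ⊢; omega) hsh (by rw [← hjd]; exact hfl)
        (by rw [hrow]; ring) (by rw [hcol]; ring) (by rw [hqwe, hjd, add_zero])
    rw [PySem.List.pyRange_neg_one_cons (by push_cast; omega), List.foldl_cons]
    have hOS : pvOStep n (g, row, col, qwe) ((m+1:Nat):Int) =
        (((pvIStep (pvDir d).2 (pvDir d).1)^[m+1] (g, row + (pvDir d).1, col + (pvDir d).2, qwe)).1,
         ((pvIStep (pvDir d).2 (pvDir d).1)^[m+1] (g, row + (pvDir d).1, col + (pvDir d).2, qwe)).2.1 - (pvDir d).1,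
         ((pvIStep (pvDir d).2 (pvDir d).1)^[m+1] (g, row + (pvDir d).1, col + (pvDir d).2, qwe)).2.2.1 - (pvDir d).2,
         ((pvIStep (pvDir d).2 (pvDir d).1)^[m+1] (g, row + (pvDir d).1, col + (pvDir d).2, qwe)).2.2.2) := by
      simp only [pvOStep, hmod]
      have hx : (if d = 0 then (0:Int) else if d = 1 then 1 else if d = 2 then -1 else 0) =
          (pvDir d).2 := by rcases hd with rfl | rfl | rfl <;> simp [pvDir]
      have hy : (if d = 0 then (1:Int) else if d = 1 then 0 else if d = 2 then -1 else 0) =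
          (pvDir d).1 := by rcases hd with rfl | rfl | rfl <;> simp [pvDir]
      rw [hx, hy]
      rw [show (fun (t : List (List Int) × Int × Int × Int) (_ : Int) =>
            (pvSetCell t.1 t.2.1 t.2.2.1 t.2.2.2, t.2.1 + (pvDir d).1, t.2.2.1 + (pvDir d).2,
              t.2.2.2 + 1)) = (fun t _ => pvIStep (pvDir d).2 (pvDir d).1 t) from rfl,
        pvFoldlConst, hlen]
    rw [hOS, show ((m+1:Nat):Int) - 1 = ((m:Nat):Int) by push_cast; ring]
    obtain ⟨k', d', hk', hd2, hsum, hch1, hch2⟩ := pvChain n k d hk hd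
    refine ih _ _ _ _ (by omega) hsh2 ?_ ⟨k', d', hk', hd2, by push_cast at hjd ⊢; omega, ?_, ?_⟩ ?_
    · rw [show n - ((m:Nat):Int) = (3 * k + d) + 1 by push_cast at hjd ⊢; omega]
      exact pvFilledSucc n (3 * k + d) _ hfl2
    · rw [hp1, hch1]
    · rw [hp2, hch2]
    · rw [hp3, pvQSucc, show n - ((m:Nat):Int) = (3 * k + d) + 1 by push_cast at hjd ⊢; omega]


-- identifying the grid with its canonical list of rows
lemma pvGridCanon (n : Int) (g : List (List Int)) (hs : pvShape n g)
    (hp : ∀ r c : Int, 0 ≤ r → 0 ≤ c → pvGget g r c = pvG n r c) :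
    g = (List.range n.toNat).map
      (fun (r : Nat) => (List.range n.toNat).map (fun (c : Nat) => pvG n (r : Int) (c : Int))) := by
  obtain ⟨hlen, hrows⟩ := hs
  apply List.ext_getElem (by simp [hlen])
  intro i h1 h2
  rw [List.getElem_map, List.getElem_range]
  have hrl : g[i].length = n.toNat := hrows _ (List.getElem_mem h1)
  apply List.ext_getElem (by simp [hrl])
  intro j hj1 hj2
  rw [List.getElem_map, List.getElem_range]
  have hh := hp (i : Int) (j : Int) (Int.natCast_nonneg i) (Int.natCast_nonneg j)
  rw [pvGgetEq _ _ _ (Int.natCast_nonneg i) (Int.natCast_nonneg j), Int.toNat_natCast,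
    Int.toNat_natCast, List.getElem?_eq_getElem h1, Option.getD_some,
    List.getElem?_eq_getElem hj1, Option.getD_some] at hh
  exact hh

-- one row of the canonical grid, flattened and filtered
lemma pvRowFlat (n : Int) (r : Nat) (hr : (r : Int) < n) :
    ((List.range n.toNat).map (fun (c : Nat) => pvG n (r : Int) (c : Int))).filter
        (fun l => decide (l ≠ 0)) =
      (List.range (r + 1)).map (fun (c : Nat) => pvF n (r : Int) (c : Int)) := by
  have hrN : r + 1 ≤ n.toNat := by omega
  rw [show n.toNat = (r + 1) + (n.toNat - (r + 1)) by omega, List.range_add,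
    List.map_append, List.filter_append]
  have hmap : (List.range (r + 1)).map (fun (c : Nat) => pvG n (r : Int) (c : Int)) =
      (List.range (r + 1)).map (fun (c : Nat) => pvF n (r : Int) (c : Int)) := by
    apply List.map_congr_left
    intro c hc
    have hcr : c < r + 1 := List.mem_range.mp hc
    rw [pvG, if_pos ⟨Int.natCast_nonneg c, by exact_mod_cast Nat.lt_succ_iff.mp hcr, hr⟩]
  rw [hmap, List.filter_eq_self.mpr, List.filter_eq_nil_iff.mpr, List.append_nil]
  · intro a ha
    obtain ⟨c, hc, hac⟩ := List.mem_map.mp ha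
    obtain ⟨c', hc', hcc⟩ := List.mem_map.mp hc
    have : pvG n (r : Int) (c : Int) = 0 := by
      rw [pvG, if_neg]
      rintro ⟨_, h2, _⟩
      have : c = (r + 1) + c' := by omega
      omega
    simp [← hac, this]
  · intro a ha
    obtain ⟨c, hc, hac⟩ := List.mem_map.mp ha
    have hcr : c < r + 1 := List.mem_range.mp hc
    have hpos := pvFPos n (r : Int) (c : Int) (Int.natCast_nonneg c)
      (by exact_mod_cast Nat.lt_succ_iff.mp hcr) hr
    simp only [← hac]
    simp
    omega

-- B's inner expression is the closed form pvF
lemma pvAltCell (n r c : Int) :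
    (let k := min c (min (n - 1 - r) (r - c))
     let joff : Int × Int :=
       if c = k then (3 * k, r - 2 * k)
       else if n - 1 - r = k then (3 * k + 1, c - k - 1)
       else (3 * k + 2, n - k - 2 - r)
     1 + joff.1 * n - PySem.Int.floordiv (joff.1 * (joff.1 - 1)) 2 + joff.2) = pvF n r c := by
  simp only [pvF, pvQ, pvSeg, pvOff, pvRing]
  split_ifs <;> ring

lemma pvAltEq (n : Int) :
    solution_alt n = (List.range n.toNat).flatMap
      (fun (r : Nat) => (List.range (r + 1)).map (fun (c : Nat) => pvF n (r : Int) (c : Int))) := by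
  simp only [solution_alt, pvAltCell]
  simp only [PySem.List.foldl_append_singleton_eq_map]
  rw [PySem.List.foldl_append_eq_flatMap, List.nil_append]
  have houter : PySem.List.pyRange 0 n 1 = (List.range n.toNat).map (fun (k : Nat) => (k : Int)) := by
    rw [PySem.List.pyRange_one, show (n - 0).toNat = n.toNat by omega]
    apply List.map_congr_left
    intro k _
    simp
  rw [houter, List.flatMap_map]
  have hfn : (fun (a : Nat) => (PySem.List.pyRange 0 ((a : Int) + 1) 1).map (fun c => pvF n (a : Int) c)) =
      (fun (r : Nat) => (List.range (r + 1)).map (fun (c : Nat) => pvF n (r : Int) (c : Int))) := by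
    funext a
    have hin : PySem.List.pyRange 0 ((a : Int) + 1) 1 =
        (List.range (a + 1)).map (fun (k : Nat) => (k : Int)) := by
      rw [PySem.List.pyRange_one, show ((a : Int) + 1 - 0).toNat = a + 1 by omega]
      apply List.map_congr_left
      intro k _
      simp
    rw [hin, List.map_map]
    rfl
  rw [hfn]

-- ===== VERDICT (by name: the statement is the Claim_ definition above) =====
theorem solution_spec : Claim_equal_solution := by
  unfold Claim_equal_solution
  intro n _
  unfold Spec_solution
  by_cases hn : 0 ≤ n
  · have hcast : ((n.toNat : Nat) : Int) = n := by omega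
    obtain ⟨hshF, hptF⟩ := pvOuter n n.toNat
      ((PySem.List.pyRange 0 n 1).map (fun _ => PySem.List.pyRepeat [(0:Int)] n))
      (-1) 0 1 (by omega) (pvZeroShape n)
      (by rw [show n - ((n.toNat : Nat) : Int) = 0 by omega]; exact pvZeroFilled n)
      ⟨0, 0, le_refl 0, Or.inl rfl, by omega, by simp [pvSPos, pvDir], by simp [pvSPos, pvDir]⟩
      (by rw [show n - ((n.toNat : Nat) : Int) = 0 by omega, pvQ,
            pvHalfEven (0 * (0 - 1)) 0 (by ring)]; ring)
    rw [hcast] at hshF hptF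
    have hA : solution n = (((PySem.List.pyRange n 0 (-1)).foldl (pvOStep n)
        ((PySem.List.pyRange 0 n 1).map (fun _ => PySem.List.pyRepeat [(0:Int)] n), -1, 0, 1)).1).foldl
        (fun rst k => k.foldl (fun rst l => if l ≠ 0 then rst ++ [l] else rst) rst) [] := rfl
    rw [hA, pvGridCanon n _ hshF hptF, pvAltEq]
    simp only [PySem.List.foldl_append_ite_eq_filter]
    rw [PySem.List.foldl_append_eq_flatMap, List.nil_append, List.flatMap_map]
    apply List.flatMap_congr
    intro r hr
    exact pvRowFlat n r (by have := List.mem_range.mp hr; omega)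
  · have h1 : PySem.List.pyRange 0 n 1 = [] := PySem.List.pyRange_one_eq_nil (by omega)
    have h2 : PySem.List.pyRange n 0 (-1) = [] := PySem.List.pyRange_neg_one_eq_nil (by omega)
    simp [solution, solution_alt, h1, h2]
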